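-- pv_equiv track=rewrite | github.com/xelnagamiao/open_mahjong_unity | open_mahjong_server/server/gamestate/game_classical/action_check.py | check_kokushi
-- ===== SOURCE A (Python) =====
-- from typing import Dict, Set, List
--
-- def check_kokushi(hand_tiles: List[int]) -> bool:
--     """
--     检查国士无双：13张起手牌之间无任何联系。
--     条件：无重复牌，且数牌(< 40)同花色内任意两张距离 > 2。
--     """
--     if len(hand_tiles) != 13:
--         return False
--     if len(set(hand_tiles)) != 13:
--         return False
--     suits: Dict[int, list] = {}
--     for t in hand_tiles:
--         if t < 40:
--             suit = t // 10
--             suits.setdefault(suit, []).append(t % 10)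
--     for values in suits.values():
--         values.sort()
--         for i in range(len(values) - 1):
--             if values[i + 1] - values[i] <= 2:
--                 return False
--     return True
-- ===== SOURCE B (Python) =====
-- from typing import List
--
-- def check_kokushi(hand_tiles: List[int]) -> bool:
--     """Kokushi starting-hand check: 13 distinct tiles, no two number tiles
--     (< 40) of the same suit within distance 2.  Instead of grouping into a
--     dict and sorting each suit, scan every unordered pair of tiles once."""
--     if len(hand_tiles) != 13:
--         return False
--     if len(set(hand_tiles)) != 13:
--         return False
--     for i, t in enumerate(hand_tiles):
--         if t < 40:
--             for u in hand_tiles[i + 1:]: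
--                 if u < 40 and u // 10 == t // 10 and abs(t % 10 - u % 10) <= 2:
--                     return False
--     return True
-- ===== Notes on version B (the rewrite author's own statement) =====
-- stated objective: alternative
-- what changed: Replaces A's group-by-suit dict plus per-suit sort and adjacent-gap scan by a single nested scan over all unordered pairs of tiles, rejecting on the first same-suit pair of number tiles within distance 2.
import Mathlib
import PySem

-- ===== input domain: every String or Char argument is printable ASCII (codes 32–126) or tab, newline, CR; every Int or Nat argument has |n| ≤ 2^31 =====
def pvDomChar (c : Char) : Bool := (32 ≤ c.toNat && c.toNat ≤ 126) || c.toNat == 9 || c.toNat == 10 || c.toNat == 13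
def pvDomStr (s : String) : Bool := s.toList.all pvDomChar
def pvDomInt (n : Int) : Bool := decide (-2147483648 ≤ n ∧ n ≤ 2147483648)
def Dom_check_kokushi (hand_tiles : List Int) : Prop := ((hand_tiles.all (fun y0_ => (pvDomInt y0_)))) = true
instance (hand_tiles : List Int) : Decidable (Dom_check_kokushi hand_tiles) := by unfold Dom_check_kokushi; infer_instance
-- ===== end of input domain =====

-- B replaces A's group-by-suit dict + per-suit sort + adjacent-gap scan by a single
-- nested scan over all unordered pairs of tiles (objective: alternative, similar cost).

-- ===== PORT A =====
-- the body of A's 'for values in suits.values()' loop: sort, then adjacent gaps must exceed 2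
def kkSuitOk (values : List Int) : Bool :=
  let vs := PySem.List.sorted values (fun x => x) false
  (PySem.List.pyRange 0 ((vs.length : Int) - 1)).all fun i =>
    !decide (PySem.List.pyGetD vs (i + 1) 0 - PySem.List.pyGetD vs i 0 ≤ 2)

def check_kokushi (hand_tiles : List Int) : Bool :=
  if hand_tiles.length ≠ 13 then false
  else if (PySem.Set.ofList hand_tiles).length ≠ 13 then false
  else
    let suits : PySem.Dict Int (List Int) :=
      hand_tiles.foldl (fun d t =>
        if t < 40 then
          d.modify (PySem.Int.floordiv t 10) [] (fun l => l ++ [PySem.Int.mod t 10])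
        else d) PySem.Dict.empty
    suits.values.all kkSuitOk

-- ===== PORT B =====
-- inner-loop test of Source B: u conflicts with an earlier number tile t
def kkClose (t u : Int) : Bool :=
  decide (u < 40) && decide (PySem.Int.floordiv u 10 = PySem.Int.floordiv t 10) &&
    decide (|PySem.Int.mod t 10 - PySem.Int.mod u 10| ≤ 2)

-- the pairwise scan 'for i, t in enumerate(...): for u in hand_tiles[i+1:]: ...'
def kkScan : List Int → Bool
  | [] => true
  | t :: rest =>
    (if t < 40 then rest.all (fun u => ! kkClose t u) else true) && kkScan rest

def check_kokushi_alt (hand_tiles : List Int) : Bool :=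
  if hand_tiles.length ≠ 13 then false
  else if (PySem.Set.ofList hand_tiles).length ≠ 13 then false
  else kkScan hand_tiles

-- ===== PRECONDITION & SPEC =====
def Spec_check_kokushi (hand_tiles : List Int) (out : Bool) : Prop := out = check_kokushi_alt hand_tiles
instance (hand_tiles : List Int) (out : Bool) : Decidable (Spec_check_kokushi hand_tiles out) := by unfold Spec_check_kokushi; infer_instance

-- ===== CLAIM (what is proved, stated in full; the proofs are below) =====
def Claim_equal_check_kokushi : Prop := ∀ (hand_tiles : List Int), Dom_check_kokushi hand_tiles → Spec_check_kokushi hand_tiles (check_kokushi hand_tiles)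

-- ===== LEMMAS AND PROOFS =====

def kfd (t : Int) : Int := PySem.Int.floordiv t 10
def kmd (t : Int) : Int := PySem.Int.mod t 10

-- the conflict relation B tests, as a Prop
def KkCloseP (t u : Int) : Prop := t < 40 ∧ u < 40 ∧ kfd u = kfd t ∧ |kmd t - kmd u| ≤ 2

lemma kk_closeP_symm : Symmetric (fun t u => ¬ KkCloseP t u) := by
  intro t u h hc
  exact h ⟨hc.2.1, hc.1, hc.2.2.1.symm, by rw [abs_sub_comm]; exact hc.2.2.2⟩

lemma kk_scan_iff (l : List Int) : kkScan l = true ↔ l.Pairwise (fun t u => ¬ KkCloseP t u) := by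
  induction l with
  | nil => simp [kkScan]
  | cons t rest ih =>
    rw [kkScan, Bool.and_eq_true, ih, List.pairwise_cons]
    constructor
    · rintro ⟨hg, hp⟩
      refine ⟨fun u hu hc => ?_, hp⟩
      rw [if_pos hc.1, List.all_eq_true] at hg
      have := hg u hu
      simp only [kkClose, Bool.not_eq_eq_eq_not, Bool.not_true, Bool.and_eq_false_iff,
        decide_eq_false_iff_not] at this
      rcases this with (h | h) | h
      · exact h hc.2.1
      · exact h hc.2.2.1
      · exact h hc.2.2.2
    · rintro ⟨hg, hp⟩
      refine ⟨?_, hp⟩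
      by_cases ht : t < 40
      · rw [if_pos ht, List.all_eq_true]
        intro u hu
        have := hg u hu
        simp only [kkClose, Bool.not_eq_eq_eq_not, Bool.not_true, Bool.and_eq_false_iff,
          decide_eq_false_iff_not]
        by_cases h1 : u < 40
        · by_cases h2 : kfd u = kfd t
          · right
            intro h3
            exact this ⟨ht, h1, h2, h3⟩
          · left; right; exact h2
        · left; left; exact h1
      · rw [if_neg ht]

lemma kk_pairwise_iff_forall {R : Int → Int → Prop} (hsym : Symmetric R) {l : List Int}
    (hnd : l.Nodup) : l.Pairwise R ↔ ∀ a ∈ l, ∀ b ∈ l, a ≠ b → R a b := by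
  constructor
  · intro h a ha b hb hab
    exact h.forall hsym ha hb hab
  · intro h
    exact List.Pairwise.imp_of_mem (fun {a b} ha hb hne => h a ha b hb hne) hnd

-- generic guard-stripped fold over a filtered list
lemma kk_foldl_ite {β : Type} (g : β → Int → β) (l : List Int) (d : β) :
    l.foldl (fun d t => if t < 40 then g d t else d) d
      = (l.filter (fun t => decide (t < 40))).foldl g d := by
  induction l generalizing d with
  | nil => rfl
  | cons x xs ih =>
    simp only [List.foldl_cons, List.filter_cons]
    by_cases h : x < 40 <;> simp [h, ih]

-- distinct-set-size guard forces Nodup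
lemma kk_nodup_of_ofList_len {xs : List Int} (h : (PySem.Set.ofList xs).length = xs.length) :
    xs.Nodup := by
  induction xs with
  | nil => simp
  | cons x xs ih =>
    rw [PySem.Set.ofList_cons] at h
    simp only [List.length_cons] at h
    have hle : (PySem.Set.discard (PySem.Set.ofList xs) x).length ≤ (PySem.Set.ofList xs).length :=
      List.length_filter_le _ _
    have hle2 := PySem.Set.length_ofList_le xs
    have heq : (PySem.Set.ofList xs).length = xs.length := by omega
    have hnd := ih heq
    have hself : PySem.Set.ofList xs = xs := PySem.Set.ofList_eq_self_of_nodup _ hnd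
    rw [hself] at h
    have hxmem : x ∉ xs := by
      intro hx
      have : (PySem.Set.discard xs x).length < xs.length := by
        apply List.length_filter_lt_length_iff_exists.mpr
        exact ⟨x, hx, by simp⟩
      omega
    exact List.nodup_cons.mpr ⟨hxmem, hnd⟩

-- adjacent-gap check over Nat range = IsChain of the gap relation
lemma kk_adj_iff (l : List Int) :
    ((List.range (l.length - 1)).all fun i => !decide (l.getD (i + 1) 0 - l.getD i 0 ≤ 2)) = true
      ↔ l.IsChain (fun a b => 2 < b - a) := by
  induction l with
  | nil => simp
  | cons a t ih =>
    cases t with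
    | nil => simp
    | cons b t' =>
      have hlen : (a :: b :: t').length - 1 = ((b :: t').length - 1) + 1 := by
        simp
      rw [hlen, List.range_succ_eq_map, List.all_cons, List.all_map]
      have hstep :
          ((List.range ((b :: t').length - 1)).all
              ((fun i => !decide ((a :: b :: t').getD (i + 1) 0 - (a :: b :: t').getD i 0 ≤ 2))
                ∘ Nat.succ))
            = ((List.range ((b :: t').length - 1)).all fun i =>
               !decide ((b :: t').getD (i + 1) 0 - (b :: t').getD i 0 ≤ 2)) :=
        congrArg (List.all (List.range ((b :: t').length - 1)))
          (funext fun i => by simp [Function.comp])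
      rw [hstep, Bool.and_eq_true, ih, List.isChain_cons_cons]
      have hhead : ((fun i => !decide ((a :: b :: t').getD (i + 1) 0 - (a :: b :: t').getD i 0 ≤ 2)) 0 = true)
          ↔ 2 < b - a := by
        simp only [List.getD_cons_succ, List.getD_cons_zero, Bool.not_eq_eq_eq_not,
          Bool.not_true, decide_eq_false_iff_not]
        omega
      rw [hhead]

-- A's per-suit check characterised, given distinct values
lemma kk_suitOk_iff (values : List Int) (hnd : values.Nodup) :
    kkSuitOk values = true ↔ ∀ a ∈ values, ∀ b ∈ values, a ≠ b → 2 < |a - b| := by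
  unfold kkSuitOk
  set vs := PySem.List.sorted values (fun x => x) false with hvs
  have hperm : vs.Perm values := PySem.List.sorted_perm values (fun x => x) false
  have hvnd : vs.Nodup := hperm.nodup_iff.mpr hnd
  have hle : vs.Pairwise (fun a b => a ≤ b) := PySem.List.sorted_pairwise values (fun x => x)
  have hmem : ∀ x, x ∈ vs ↔ x ∈ values := fun x => hperm.mem_iff
  -- reduce the pyRange/pyGetD loop to the Nat-indexed form
  have hloop :
      ((PySem.List.pyRange 0 ((vs.length : Int) - 1)).all fun i =>
          !decide (PySem.List.pyGetD vs (i + 1) 0 - PySem.List.pyGetD vs i 0 ≤ 2))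
        = ((List.range (vs.length - 1)).all fun i =>
          !decide (vs.getD (i + 1) 0 - vs.getD i 0 ≤ 2)) := by
    cases hn : vs.length with
    | zero =>
      have hnil : vs = [] := List.length_eq_zero_iff.mp hn
      rw [hnil]
      decide
    | succ m =>
      have h1 : (((m + 1 : Nat) : Int) - 1) = ((m : Nat) : Int) := by push_cast; ring
      rw [h1, PySem.List.pyRange_zero_natCast, List.all_map]
      have h2 : m + 1 - 1 = m := rfl
      rw [h2]
      exact congrArg (List.all (List.range m)) (funext fun i => by
        simp only [Function.comp_apply]
        have h3 : ((i : Int) + 1) = ((i + 1 : Nat) : Int) := by push_cast; ring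
        rw [h3, PySem.List.pyGetD_natCast, PySem.List.pyGetD_natCast])
  rw [hloop, kk_adj_iff]
  have hchain : vs.IsChain (fun a b => 2 < b - a) ↔ vs.Pairwise (fun a b => 2 < b - a) := by
    constructor
    · intro h
      exact @List.IsChain.pairwise _ _ _ ⟨fun h1 h2 => by omega⟩ h
    · intro h; exact h.isChain
  rw [hchain]
  constructor
  · intro h a ha b hb hab
    have hR : vs.Pairwise (fun a b => 2 < |a - b|) := by
      apply List.Pairwise.imp_of_mem (fun {x y} _ _ hxy => ?_) h
      have hx : y - x ≤ |x - y| := by rw [abs_sub_comm]; exact le_abs_self _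
      omega
    exact hR.forall (fun x y hxy => by rwa [abs_sub_comm]) ((hmem a).mpr ha) ((hmem b).mpr hb) hab
  · intro h
    have hlt : vs.Pairwise (fun a b => a < b) := by
      refine List.Pairwise.imp_of_mem (fun {x y} hx hy hxy => ?_) (hle.and hvnd)
      exact lt_of_le_of_ne hxy.1 hxy.2
    apply List.Pairwise.imp_of_mem (fun {x y} hx hy hxy => ?_) hlt
    have h4 := h x ((hmem x).mp hx) y ((hmem y).mp hy) (ne_of_lt hxy)
    have habs : |x - y| = y - x := by rw [abs_sub_comm]; exact abs_of_nonneg (by omega)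
    omega

-- tiles of one suit determine the tile from its value
lemma kk_decomp (t : Int) : kfd t * 10 + kmd t = t := PySem.Int.floordiv_mul_add_mod t 10

-- the dict A builds: lookup of suit s is the in-order list of values of suit-s tiles
lemma kk_dict (hand : List Int) (s : Int) :
    ((hand.filter (fun t => decide (t < 40))).foldl
        (fun d t => d.modify (kfd t) [] (fun l => l ++ [kmd t])) PySem.Dict.empty).getD s []
      = ((hand.filter (fun t => decide (t < 40))).filter (fun t => kfd t == s)).map kmd := by
  set L := hand.filter (fun t => decide (t < 40))
  have h1 : L.foldl (fun d t => d.modify (kfd t) [] (fun l => l ++ [kmd t])) PySem.Dict.empty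
      = (L.map (fun t => (kfd t, kmd t))).foldl
          (fun d p => d.modify p.1 [] (fun l => l ++ [p.2])) PySem.Dict.empty := by
    rw [List.foldl_map]
  rw [h1, PySem.Dict.getD_foldl_modify_append]
  rw [PySem.Dict.getD_empty, List.nil_append, List.filter_map, List.map_map]
  rfl

lemma kk_keys (hand : List Int) :
    ((hand.filter (fun t => decide (t < 40))).foldl
        (fun d t => d.modify (kfd t) [] (fun l => l ++ [kmd t])) PySem.Dict.empty).keys
      = PySem.Set.ofList ((hand.filter (fun t => decide (t < 40))).map kfd) := by
  rw [PySem.Dict.keys_foldl_modify_key, PySem.Dict.keys_empty, PySem.Set.update_nil_left]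

-- the whole suits check = no two same-suit number tiles within distance 2
lemma kk_body (hand : List Int) (hnd : hand.Nodup) :
    ((hand.foldl (fun d t =>
        if t < 40 then
          d.modify (PySem.Int.floordiv t 10) [] (fun l => l ++ [PySem.Int.mod t 10])
        else d) PySem.Dict.empty).values.all kkSuitOk) = kkScan hand := by
  rw [Bool.eq_iff_iff, kk_scan_iff, kk_pairwise_iff_forall kk_closeP_symm hnd]
  have hfold : hand.foldl (fun d t =>
        if t < 40 then
          d.modify (PySem.Int.floordiv t 10) [] (fun l => l ++ [PySem.Int.mod t 10])
        else d) PySem.Dict.empty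
      = (hand.filter (fun t => decide (t < 40))).foldl
          (fun d t => d.modify (kfd t) [] (fun l => l ++ [kmd t])) PySem.Dict.empty :=
    kk_foldl_ite _ hand _
  rw [hfold]
  set L := hand.filter (fun t => decide (t < 40)) with hL
  set D := L.foldl (fun d t => d.modify (kfd t) [] (fun l => l ++ [kmd t])) PySem.Dict.empty with hD
  have hkeys : D.keys = PySem.Set.ofList (L.map kfd) := kk_keys hand
  have hknd : D.keys.Nodup := hkeys ▸ PySem.Set.nodup_ofList _
  have hgetD : ∀ s, D.getD s [] = (L.filter (fun t => kfd t == s)).map kmd :=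
    fun s => kk_dict hand s
  have hLnd : L.Nodup := hnd.filter _
  have hgnd : ∀ s, ((L.filter (fun t => kfd t == s)).map kmd).Nodup := by
    intro s
    refine List.Nodup.map_on ?_ (hLnd.filter _)
    intro x hx y hy hxy
    have hxs : kfd x = s := by simpa using (List.mem_filter.mp hx).2
    have hys : kfd y = s := by simpa using (List.mem_filter.mp hy).2
    have hdx := kk_decomp x
    have hdy := kk_decomp y
    omega
  rw [PySem.Dict.values_eq_map_keys D hknd [], List.all_eq_true]
  constructor
  · intro hA t ht u hu htu hc
    obtain ⟨ht40, hu40, hfd, habs⟩ := hc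
    have htL : t ∈ L := List.mem_filter.mpr ⟨ht, by simp [ht40]⟩
    have huL : u ∈ L := List.mem_filter.mpr ⟨hu, by simp [hu40]⟩
    have hkeymem : kfd t ∈ D.keys := by
      rw [hkeys, PySem.Set.mem_ofList]
      exact List.mem_map_of_mem htL
    have hsuit : kkSuitOk (D.getD (kfd t) []) = true :=
      hA _ (List.mem_map.mpr ⟨kfd t, hkeymem, rfl⟩)
    rw [hgetD, kk_suitOk_iff _ (hgnd _)] at hsuit
    have hat : kmd t ∈ (L.filter (fun x => kfd x == kfd t)).map kmd :=
      List.mem_map_of_mem (List.mem_filter.mpr ⟨htL, by simp⟩)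
    have hau : kmd u ∈ (L.filter (fun x => kfd x == kfd t)).map kmd :=
      List.mem_map_of_mem (List.mem_filter.mpr ⟨huL, by simp [hfd]⟩)
    have hne : kmd t ≠ kmd u := by
      intro h
      apply htu
      have hdt := kk_decomp t
      have hdu := kk_decomp u
      omega
    exact absurd (hsuit _ hat _ hau hne) (not_lt.mpr habs)
  · intro hB v hv
    obtain ⟨s, hs, rfl⟩ := List.mem_map.mp hv
    rw [hgetD, kk_suitOk_iff _ (hgnd s)]
    intro a ha b hb hab
    obtain ⟨t, htf, rfl⟩ := List.mem_map.mp ha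
    obtain ⟨u, huf, rfl⟩ := List.mem_map.mp hb
    obtain ⟨htL, hts⟩ := List.mem_filter.mp htf
    obtain ⟨huL, hus⟩ := List.mem_filter.mp huf
    have hts' : kfd t = s := by simpa using hts
    have hus' : kfd u = s := by simpa using hus
    obtain ⟨hthand, ht40b⟩ := List.mem_filter.mp htL
    obtain ⟨huhand, hu40b⟩ := List.mem_filter.mp huL
    have ht40 : t < 40 := by simpa using ht40b
    have hu40 : u < 40 := by simpa using hu40b
    have htu : t ≠ u := fun h => hab (by rw [h])
    have hnc := hB t hthand u huhand htu
    by_contra hle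
    exact hnc ⟨ht40, hu40, hus'.trans hts'.symm, by omega⟩

-- ===== VERDICT (by name: the statement is the Claim_ definition above) =====
theorem check_kokushi_spec : Claim_equal_check_kokushi := by
  intro hand _hdom
  unfold Spec_check_kokushi check_kokushi check_kokushi_alt
  by_cases h13 : hand.length = 13
  · by_cases hset : (PySem.Set.ofList hand).length = 13
    · have hnd : hand.Nodup := kk_nodup_of_ofList_len (by omega)
      simp only [h13, hset, ne_eq, not_true_eq_false, if_false]
      exact kk_body hand hnd
    · simp [h13, hset]
  · simp [h13]
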